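-- pv_equiv track=rewrite | github.com/nanometre380/Algorithms | programmers/42584.py | solution
-- ===== SOURCE A (Python) =====
-- def solution(prices):
--     answer = []
--     len_p = len(prices)
--     for i in range(len_p) :
--         temp = 0
--         for j in range(i, len_p) :
--             if prices[i] > prices[j] or j == len_p-1:
--                 answer.append(temp)
--                 break
--             temp += 1
--     return answer
-- ===== SOURCE B (Python) =====
-- def solution(prices):
--     n = len(prices)
--     answer = [0] * n
--     stack = []
--     for j in range(n):
--         p = prices[j]
--         while stack and prices[stack[-1]] > p:
--             i = stack.pop()
--             answer[i] = j - i
--         stack.append(j)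
--     for i in stack:
--         answer[i] = n - 1 - i
--     return answer
-- ===== Notes on version B (the rewrite author's own statement) =====
-- stated objective: faster
-- what changed: Replaced the per-index inner rescan (for each i, scan forward until a lower price) by a single forward pass with a monotonic index stack: when a price drops, all sustained durations ending there are popped and recorded at once; surviving indices get n-1-i at the end.
import Mathlib
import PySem

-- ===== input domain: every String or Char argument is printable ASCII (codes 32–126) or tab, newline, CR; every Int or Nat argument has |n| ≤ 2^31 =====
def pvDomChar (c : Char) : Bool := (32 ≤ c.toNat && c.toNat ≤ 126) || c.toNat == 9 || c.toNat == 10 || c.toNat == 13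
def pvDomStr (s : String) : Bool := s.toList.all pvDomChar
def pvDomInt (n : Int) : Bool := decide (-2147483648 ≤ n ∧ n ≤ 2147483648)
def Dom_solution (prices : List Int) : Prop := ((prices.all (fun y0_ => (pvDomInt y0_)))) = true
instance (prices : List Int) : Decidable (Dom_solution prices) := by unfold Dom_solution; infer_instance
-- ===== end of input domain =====

-- B replaces A's quadratic per-index forward rescan by a single pass with a monotonic
-- index stack (pop and record a duration when the price drops); objective: faster (O(n)).

-- ===== PORT A =====
-- inner 'for j in range(i, len_p)' loop of A: returns the list of elements appended
-- to answer during this inner loop (one element, appended at the break)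
def innerA (prices : List Int) (lenP i : Nat) : Nat → Nat → Int → List Int
  | 0, _, _ => []
  | fuel+1, j, temp =>
    if prices.getD i 0 > prices.getD j 0 ∨ j = lenP - 1 then [temp]
    else innerA prices lenP i fuel (j+1) (temp+1)

def solution (prices : List Int) : List Int :=
  let lenP := prices.length
  (List.range lenP).foldl (fun answer i => answer ++ innerA prices lenP i (lenP - i) i 0) []

-- ===== PORT B =====
-- the 'while stack and prices[stack[-1]] > p' loop of B (stack top at list head)
def popLoop (prices : List Int) (j : Nat) : List Int → List Nat → List Int × List Nat
  | answer, [] => (answer, [])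
  | answer, i :: rest =>
    if prices.getD i 0 > prices.getD j 0 then
      popLoop prices j (answer.set i ((j : Int) - (i : Int))) rest
    else (answer, i :: rest)

def solution_alt (prices : List Int) : List Int :=
  let n := prices.length
  let st := (List.range n).foldl
    (fun (st : List Int × List Nat) j =>
      let pr := popLoop prices j st.1 st.2
      (pr.1, j :: pr.2))
    (List.replicate n 0, [])
  st.2.foldl (fun answer i => answer.set i ((n : Int) - 1 - (i : Int))) st.1

-- ===== PRECONDITION & SPEC =====
def Spec_solution (prices : List Int) (out : List Int) : Prop := out = solution_alt prices
instance (prices : List Int) (out : List Int) : Decidable (Spec_solution prices out) := by unfold Spec_solution; infer_instance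

-- ===== CLAIM (what is proved, stated in full; the proofs are below) =====
def Claim_equal_solution : Prop := ∀ (prices : List Int), Dom_solution prices → Spec_solution prices (solution prices)

-- ===== LEMMAS AND PROOFS =====

-- first index ≥ j (within fuel steps) whose price is strictly below pi
def fd (prices : List Int) (pi : Int) : Nat → Nat → Option Nat
  | _, 0 => none
  | j, fuel+1 => if prices.getD j 0 < pi then some j else fd prices pi (j+1) fuel

-- the intended answer at index i
def specF (prices : List Int) (i : Nat) : Int :=
  match fd prices (prices.getD i 0) (i+1) (prices.length - (i+1)) with
  | some j => (j : Int) - (i : Int)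
  | none => (prices.length : Int) - 1 - (i : Int)

def alive (prices : List Int) (i j : Nat) : Bool :=
  (fd prices (prices.getD i 0) (i+1) (j - (i+1))).isNone

def sList (prices : List Int) (j : Nat) : List Nat :=
  ((List.range j).filter (fun i => alive prices i j)).reverse

def hFun (prices : List Int) (j : Nat) (k : Nat) : Int :=
  if alive prices k j then 0 else specF prices k

def aState (prices : List Int) (j : Nat) : List Int :=
  (List.range prices.length).map (hFun prices j)

theorem fd_snoc (prices : List Int) (pi : Int) (fuel : Nat) : ∀ j, fd prices pi j (fuel+1) =
    match fd prices pi j fuel with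
    | some x => some x
    | none => if prices.getD (j+fuel) 0 < pi then some (j+fuel) else none := by
  induction fuel with
  | zero => intro j; simp [fd]
  | succ f ih =>
    intro j
    have hstep : ∀ g : Nat, fd prices pi j (g+1) =
        if prices.getD j 0 < pi then some j else fd prices pi (j+1) g := fun g => rfl
    by_cases h : prices.getD j 0 < pi
    · rw [hstep (f+1), if_pos h, hstep f, if_pos h]
    · rw [hstep (f+1), if_neg h, hstep f, if_neg h, ih (j+1),
        show (j+1)+f = j+(f+1) by omega]

theorem fd_none_iff (prices : List Int) (pi : Int) (fuel : Nat) : ∀ j, fd prices pi j fuel = none ↔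
    ∀ t, t < fuel → ¬ prices.getD (j+t) 0 < pi := by
  induction fuel with
  | zero => intro j; simp [fd]
  | succ f ih =>
    intro j
    by_cases h : prices.getD j 0 < pi
    · simp only [fd, if_pos h]
      constructor
      · intro hc; exact absurd hc (by simp)
      · intro hall; exact absurd h (by simpa using hall 0 (by omega))
    · simp only [fd, if_neg h, ih (j+1)]
      constructor
      · intro hall t ht
        rcases Nat.eq_zero_or_pos t with rfl | hp
        · simpa using h
        · have := hall (t-1) (by omega); simpa [show j + 1 + (t-1) = j + t by omega] using this
      · intro hall t ht
        have := hall (t+1) (by omega); simpa [show j + (t+1) = j + 1 + t by omega] using this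

theorem fd_mono (prices : List Int) (pi : Int) : ∀ f f' j x, f ≤ f' →
    fd prices pi j f = some x → fd prices pi j f' = some x := by
  intro f f' j x hle hf
  induction f' with
  | zero =>
    rw [Nat.le_zero.mp hle] at hf
    simp [fd] at hf
  | succ g ih =>
    rcases Nat.lt_or_ge f (g+1) with hlt | hge
    · have := ih (by omega)
      rw [fd_snoc]; rw [this]
    · have : f = g + 1 := by omega
      subst this; exact hf

-- ===== A-side =====

theorem innerA_eq (prices : List Int) (i : Nat) : ∀ fuel j, i ≤ j → j < prices.length →
    fuel = prices.length - j →
    innerA prices prices.length i fuel j ((j : Int) - (i : Int)) =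
      [match fd prices (prices.getD i 0) j fuel with
       | some x => (x : Int) - (i : Int)
       | none => (prices.length : Int) - 1 - (i : Int)] := by
  intro fuel
  have istep : ∀ g j t, innerA prices prices.length i (g+1) j t =
      if prices.getD i 0 > prices.getD j 0 ∨ j = prices.length - 1 then [t]
      else innerA prices prices.length i g (j+1) (t+1) := fun _ _ _ => rfl
  have fstep : ∀ g j, fd prices (prices.getD i 0) j (g+1) =
      if prices.getD j 0 < prices.getD i 0 then some j
      else fd prices (prices.getD i 0) (j+1) g := fun _ _ => rfl
  induction fuel with
  | zero => intro j hij hj hf; omega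
  | succ f ih =>
    intro j hij hj hf
    by_cases hd : prices.getD i 0 > prices.getD j 0
    · rw [istep, if_pos (Or.inl hd), fstep, if_pos hd]
    · have hd' : ¬ prices.getD j 0 < prices.getD i 0 := hd
      by_cases hl : j = prices.length - 1
      · have hf0 : f = 0 := by omega
        subst hf0
        rw [istep, if_pos (Or.inr hl), fstep, if_neg hd']
        show [(j:Int) - (i:Int)] = [(prices.length:Int) - 1 - (i:Int)]
        congr 1
        omega
      · rw [istep, if_neg (not_or.mpr ⟨hd, hl⟩), fstep, if_neg hd',
          show ((j:Int) - (i:Int) + 1) = ((j+1:Nat):Int) - (i:Int) by push_cast; ring]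
        exact ih (j+1) (by omega) (by omega) (by omega)

theorem flatMap_eq_map {α β : Type} (g : α → List β) (f : α → β) :
    ∀ l : List α, (∀ x ∈ l, g x = [f x]) → l.flatMap g = l.map f := by
  intro l h
  induction l with
  | nil => simp
  | cons a t ih => simp [List.flatMap_cons, h a (by simp), ih (fun x hx => h x (by simp [hx]))]

theorem foldl_append_gen {α β : Type} (g : α → List β) :
    ∀ (l : List α) (acc : List β), l.foldl (fun a x => a ++ g x) acc = acc ++ l.flatMap g := by
  intro l
  induction l with
  | nil => simp
  | cons a t ih => intro acc; simp [List.foldl_cons, ih, List.flatMap_cons]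

theorem solution_eq_spec (prices : List Int) :
    solution prices = (List.range prices.length).map (specF prices) := by
  unfold solution
  rw [foldl_append_gen]
  simp only [List.nil_append]
  apply flatMap_eq_map
  intro i hi
  have hi' : i < prices.length := List.mem_range.mp hi
  have h0 : (0 : Int) = (i : Int) - (i : Int) := by omega
  rw [h0, innerA_eq prices i (prices.length - i) i (le_refl i) hi' rfl]
  have hfd : fd prices (prices.getD i 0) i (prices.length - i) =
      fd prices (prices.getD i 0) (i+1) (prices.length - (i+1)) := by
    have : prices.length - i = (prices.length - (i+1)) + 1 := by omega
    rw [this]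
    simp [fd]
  rw [hfd]
  rfl

-- ===== B-side =====

theorem alive_iff (prices : List Int) (i j : Nat) :
    alive prices i j = true ↔ fd prices (prices.getD i 0) (i+1) (j - (i+1)) = none := by
  simp [alive, Option.isNone_iff_eq_none]

theorem alive_of_ge (prices : List Int) (i j : Nat) (h : j ≤ i) : alive prices i j = true := by
  rw [alive_iff]
  have : j - (i+1) = 0 := by omega
  rw [this]; rfl

theorem alive_succ (prices : List Int) (i j : Nat) (hij : i ≤ j) :
    alive prices i (j+1) = (alive prices i j && !(prices.getD j 0 < prices.getD i 0)) := by
  rcases Nat.eq_or_lt_of_le hij with rfl | hlt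
  · have h1 : alive prices i i = true := alive_of_ge prices i i le_rfl
    have h2 : alive prices i (i+1) = true := by
      unfold alive
      rw [show i + 1 - (i+1) = 0 by omega]
      rfl
    rw [h1, h2]
    simp
  · have hfe : j + 1 - (i+1) = (j - (i+1)) + 1 := by omega
    unfold alive
    rw [hfe, fd_snoc, show (i+1) + (j - (i+1)) = j by omega]
    rcases hx : fd prices (prices.getD i 0) (i+1) (j - (i+1)) with _ | x
    · by_cases hb : prices.getD j 0 < prices.getD i 0
      · rw [if_pos hb, decide_eq_true hb]
        simp
      · rw [if_neg hb, decide_eq_false hb]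
        simp
    · simp

-- newly dead at step j: the first drop of k is exactly j
theorem specF_of_drop (prices : List Int) (k j : Nat) (hk : k < j) (hj : j < prices.length)
    (ha : alive prices k j = true) (hb : prices.getD j 0 < prices.getD k 0) :
    specF prices k = (j : Int) - (k : Int) := by
  rw [alive_iff] at ha
  have h1 : fd prices (prices.getD k 0) (k+1) ((j - (k+1)) + 1) = some j := by
    rw [fd_snoc, ha, show (k+1) + (j - (k+1)) = j by omega]
    exact if_pos hb
  have h2 : fd prices (prices.getD k 0) (k+1) (prices.length - (k+1)) = some j :=
    fd_mono prices _ _ _ _ _ (by omega) h1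
  unfold specF
  rw [h2]

theorem specF_of_alive (prices : List Int) (k : Nat) (ha : alive prices k prices.length = true) :
    specF prices k = (prices.length : Int) - 1 - (k : Int) := by
  rw [alive_iff] at ha
  unfold specF
  rw [ha]

theorem mem_sList (prices : List Int) (j k : Nat) :
    k ∈ sList prices j ↔ k < j ∧ alive prices k j = true := by
  simp [sList, List.mem_filter, List.mem_range]

theorem sList_pairwise (prices : List Int) (j : Nat) :
    (sList prices j).Pairwise (fun a b => prices.getD b 0 ≤ prices.getD a 0) := by
  have hgt : (sList prices j).Pairwise (fun a b => b < a) := by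
    have : ((List.range j).filter (fun i => alive prices i j)).Pairwise (· < ·) :=
      List.Pairwise.sublist List.filter_sublist List.pairwise_lt_range
    simpa [sList, List.pairwise_reverse] using this
  apply List.Pairwise.imp_of_mem _ hgt
  intro a b ha hb hlt
  -- b < a, both in sList j: b alive at j and a < j, so price at a ≥ price at b
  rw [mem_sList] at ha hb
  have hba : fd prices (prices.getD b 0) (b+1) (j - (b+1)) = none := (alive_iff _ _ _).mp hb.2
  have := (fd_none_iff _ _ _ _).mp hba (a - (b+1)) (by omega)
  have hx : (b+1) + (a - (b+1)) = a := by omega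
  rw [hx] at this
  omega

theorem popLoop_eq (prices : List Int) (j : Nat) :
    ∀ (l : List Nat) (A : List Int), popLoop prices j A l =
      ((l.takeWhile (fun i => decide (prices.getD j 0 < prices.getD i 0))).foldl
         (fun a i => a.set i ((j : Int) - (i : Int))) A,
       l.dropWhile (fun i => decide (prices.getD j 0 < prices.getD i 0))) := by
  intro l
  induction l with
  | nil => intro A; simp [popLoop]
  | cons i rest ih =>
    intro A
    have pstep : ∀ A : List Int, popLoop prices j A (i :: rest) =
        if prices.getD i 0 > prices.getD j 0 then
          popLoop prices j (A.set i ((j : Int) - (i : Int))) rest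
        else (A, i :: rest) := fun _ => rfl
    by_cases h : prices.getD i 0 > prices.getD j 0
    · rw [pstep, if_pos h, ih, List.takeWhile_cons, List.dropWhile_cons,
        decide_eq_true (show prices.getD j 0 < prices.getD i 0 from h)]
      simp
    · rw [pstep, if_neg h, List.takeWhile_cons, List.dropWhile_cons,
        decide_eq_false (show ¬ prices.getD j 0 < prices.getD i 0 from h)]
      simp

theorem takeWhile_eq_filter_of_pairwise (prices : List Int) (j : Nat) :
    ∀ l : List Nat, l.Pairwise (fun a b => prices.getD b 0 ≤ prices.getD a 0) →
      l.takeWhile (fun i => decide (prices.getD j 0 < prices.getD i 0)) =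
        l.filter (fun i => decide (prices.getD j 0 < prices.getD i 0)) ∧
      l.dropWhile (fun i => decide (prices.getD j 0 < prices.getD i 0)) =
        l.filter (fun i => !decide (prices.getD j 0 < prices.getD i 0)) := by
  intro l
  induction l with
  | nil => simp
  | cons i rest ih =>
    intro hp
    rw [List.pairwise_cons] at hp
    obtain ⟨hhead, htail⟩ := hp
    obtain ⟨iht, ihd⟩ := ih htail
    by_cases h : prices.getD j 0 < prices.getD i 0
    · constructor
      · rw [List.takeWhile_cons_of_pos (p := fun k => decide (prices.getD j 0 < prices.getD k 0))
            (by exact decide_eq_true h),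
          List.filter_cons_of_pos (p := fun k => decide (prices.getD j 0 < prices.getD k 0))
            (by exact decide_eq_true h), iht]
      · rw [List.dropWhile_cons_of_pos (p := fun k => decide (prices.getD j 0 < prices.getD k 0))
            (by exact decide_eq_true h),
          List.filter_cons_of_neg (p := fun k => !decide (prices.getD j 0 < prices.getD k 0))
            (by show ¬ (!decide _) = _; rw [decide_eq_true h]; simp), ihd]
    · constructor
      · rw [List.takeWhile_cons_of_neg (p := fun k => decide (prices.getD j 0 < prices.getD k 0))
            (by show ¬ decide _ = _; rw [decide_eq_false h]; simp),
          List.filter_cons_of_neg (p := fun k => decide (prices.getD j 0 < prices.getD k 0))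
            (by show ¬ decide _ = _; rw [decide_eq_false h]; simp)]
        symm
        rw [List.filter_eq_nil_iff]
        intro a ha hc
        have h1 := hhead a ha
        have h2 : prices.getD j 0 < prices.getD a 0 := of_decide_eq_true hc
        omega
      · rw [List.dropWhile_cons_of_neg (p := fun k => decide (prices.getD j 0 < prices.getD k 0))
            (by show ¬ decide _ = _; rw [decide_eq_false h]; simp),
          List.filter_cons_of_pos (p := fun k => !decide (prices.getD j 0 < prices.getD k 0))
            (by show (!decide _) = _; rw [decide_eq_false h]; rfl)]
        congr 1
        symm
        rw [List.filter_eq_self]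
        intro a ha
        show (!decide (prices.getD j 0 < prices.getD a 0)) = true
        have h1 := hhead a ha
        rw [decide_eq_false (by omega)]
        rfl

theorem set_map_range (n : Nat) (h : Nat → Int) (i : Nat) (v : Int) (_hi : i < n) :
    ((List.range n).map h).set i v = (List.range n).map (fun k => if k = i then v else h k) := by
  apply List.ext_getElem
  · simp
  · intro k hk1 hk2
    simp only [List.getElem_set, List.getElem_map, List.getElem_range]
    by_cases hki : k = i
    · simp [hki]
    · simp [hki]
      exact fun hik => absurd hik.symm hki

theorem foldl_set_map (n : Nat) (f : Nat → Int) :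
    ∀ (l : List Nat) (h : Nat → Int), (∀ i ∈ l, i < n) →
      l.foldl (fun a i => a.set i (f i)) ((List.range n).map h) =
        (List.range n).map (fun k => if k ∈ l then f k else h k) := by
  intro l
  induction l with
  | nil => intro h _; simp
  | cons i rest ih =>
    intro h hmem
    simp only [List.foldl_cons]
    rw [set_map_range n h i (f i) (hmem i (by simp))]
    rw [ih _ (fun x hx => hmem x (by simp [hx]))]
    congr 1
    funext k
    by_cases h1 : k ∈ rest
    · simp [h1]
    · by_cases h2 : k = i <;> simp [h1, h2]

theorem aState_zero (prices : List Int) : aState prices 0 = List.replicate prices.length 0 := by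
  unfold aState
  have h0 : ∀ k, hFun prices 0 k = 0 := by
    intro k; simp [hFun, alive_of_ge prices k 0 (by omega)]
  rw [List.map_congr_left (fun a _ => h0 a), List.map_const', List.length_range]

theorem sList_succ (prices : List Int) (j : Nat) :
    sList prices (j+1) = j :: (sList prices j).filter
      (fun i => !decide (prices.getD j 0 < prices.getD i 0)) := by
  unfold sList
  rw [List.range_succ, List.filter_append]
  have hj : alive prices j (j+1) = true := by
    rw [alive_iff]; have : j + 1 - (j+1) = 0 := by omega
    rw [this]; rfl
  have h2 : (List.range j).filter (fun i => alive prices i (j+1)) =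
      ((List.range j).filter (fun i => alive prices i j)).filter
        (fun i => !decide (prices.getD j 0 < prices.getD i 0)) := by
    rw [List.filter_filter]
    apply List.filter_congr
    intro i hi
    have hij : i < j := List.mem_range.mp hi
    rw [alive_succ prices i j (by omega)]
    cases alive prices i j <;> by_cases hb : prices.getD j 0 < prices.getD i 0 <;> simp
  rw [h2]
  simp [hj, List.filter_reverse]

theorem step_invariant (prices : List Int) (j : Nat) (hj : j < prices.length) :
    ((popLoop prices j (aState prices j) (sList prices j)).1,
      j :: (popLoop prices j (aState prices j) (sList prices j)).2) =
      (aState prices (j+1), sList prices (j+1)) := by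
  rw [popLoop_eq]
  obtain ⟨htake, hdrop⟩ := takeWhile_eq_filter_of_pairwise prices j (sList prices j) (sList_pairwise prices j)
  rw [htake, hdrop, Prod.mk.injEq]
  constructor
  · -- answer component
    show ((sList prices j).filter _).foldl _ (aState prices j) = aState prices (j+1)
    unfold aState
    rw [foldl_set_map prices.length _ _ (hFun prices j) ?mem]
    case mem =>
      intro i hi
      rw [List.mem_filter, mem_sList] at hi
      omega
    apply List.map_congr_left
    intro k hk
    have hkn : k < prices.length := List.mem_range.mp hk
    by_cases hm : k ∈ (sList prices j).filter (fun i => decide (prices.getD j 0 < prices.getD i 0))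
    · have hm' := hm
      rw [List.mem_filter, mem_sList] at hm'
      obtain ⟨⟨hkj, hal⟩, hb⟩ := hm'
      have hb' : prices.getD j 0 < prices.getD k 0 := of_decide_eq_true hb
      have hdead : alive prices k (j+1) = false := by
        rw [alive_succ prices k j (by omega), hal, decide_eq_true hb']
        rfl
      rw [if_pos hm]
      unfold hFun
      rw [hdead, specF_of_drop prices k j hkj hj hal hb']
      simp
    · rw [if_neg hm]
      unfold hFun
      rcases Nat.lt_or_ge k j with hkj | hkj
      · by_cases hal : alive prices k j = true
        · have hb : ¬ prices.getD j 0 < prices.getD k 0 := by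
            intro hb
            exact hm (List.mem_filter.mpr
              ⟨(mem_sList prices j k).mpr ⟨hkj, hal⟩, decide_eq_true hb⟩)
          have h2 : alive prices k (j+1) = true := by
            rw [alive_succ prices k j (by omega), hal, decide_eq_false hb]
            rfl
          rw [hal, h2]
        · have hal' : alive prices k j = false := by simpa using hal
          have h2 : alive prices k (j+1) = false := by
            rw [alive_succ prices k j (by omega), hal']
            rfl
          rw [hal', h2]
      · have h1 : alive prices k j = true := alive_of_ge prices k j (by omega)
        have h2 : alive prices k (j+1) = true := by
          rcases Nat.eq_or_lt_of_le hkj with rfl | hlt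
          · rw [alive_succ prices j j le_rfl, h1]
            simp
          · exact alive_of_ge prices k (j+1) (by omega)
        rw [h1, h2]
  · -- stack component
    show j :: (sList prices j).filter (fun i => !decide (prices.getD j 0 < prices.getD i 0)) =
      sList prices (j+1)
    rw [sList_succ]

theorem main_fold (prices : List Int) : ∀ j, j ≤ prices.length →
    (List.range j).foldl
      (fun (st : List Int × List Nat) j =>
        ((popLoop prices j st.1 st.2).1, j :: (popLoop prices j st.1 st.2).2))
      (List.replicate prices.length 0, []) = (aState prices j, sList prices j) := by
  intro j
  induction j with
  | zero => intro _; simp [aState_zero, sList]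
  | succ m ih =>
    intro hm
    rw [List.range_succ, List.foldl_append, ih (by omega)]
    simp only [List.foldl_cons, List.foldl_nil]
    exact step_invariant prices m (by omega)

theorem solution_alt_eq_spec (prices : List Int) :
    solution_alt prices = (List.range prices.length).map (specF prices) := by
  show ((List.range prices.length).foldl
      (fun (st : List Int × List Nat) j =>
        ((popLoop prices j st.1 st.2).1, j :: (popLoop prices j st.1 st.2).2))
      (List.replicate prices.length 0, [])).2.foldl
      (fun answer i => answer.set i ((prices.length : Int) - 1 - (i : Int)))
      ((List.range prices.length).foldl
      (fun (st : List Int × List Nat) j =>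
        ((popLoop prices j st.1 st.2).1, j :: (popLoop prices j st.1 st.2).2))
      (List.replicate prices.length 0, [])).1 = _
  rw [main_fold prices prices.length le_rfl]
  show (sList prices prices.length).foldl _ (aState prices prices.length) = _
  unfold aState
  rw [foldl_set_map prices.length _ _ (hFun prices prices.length) ?mem]
  case mem =>
    intro i hi
    rw [mem_sList] at hi
    omega
  apply List.map_congr_left
  intro k hk
  have hkn : k < prices.length := List.mem_range.mp hk
  by_cases hm : k ∈ sList prices prices.length
  · rw [if_pos hm]
    rw [mem_sList] at hm
    rw [specF_of_alive prices k hm.2]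
  · rw [if_neg hm]
    unfold hFun
    have hal : alive prices k prices.length = false := by
      rcases h : alive prices k prices.length with _ | _
      · rfl
      · exact absurd ((mem_sList prices prices.length k).mpr ⟨hkn, h⟩) hm
    rw [hal]
    simp

-- ===== VERDICT (by name: the statement is the Claim_ definition above) =====
theorem solution_spec : Claim_equal_solution := by
  intro prices _
  unfold Spec_solution
  rw [solution_eq_spec, solution_alt_eq_spec]
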